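-- pv_equiv track=rewrite | github.com/vdumchiviy/just_interesting_tasks | codesignal_com/codesignal_com034.py | solution
-- ===== SOURCE A (Python) =====
-- def solution(upSpeed, downSpeed, desiredHeight):
--     height = 0
--     if height + upSpeed >= desiredHeight:
--         return 1
--     days = 0
--     while True:
--         height = height + upSpeed
--         days += 1
--         if height >= desiredHeight:
--             return days
--         height = height - downSpeed
-- ===== SOURCE B (Python) =====
-- def solution(upSpeed, downSpeed, desiredHeight):
--     if upSpeed >= desiredHeight:
--         return 1
--     # days = 1 + ceil((desiredHeight - upSpeed) / (upSpeed - downSpeed))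
--     return 1 - (upSpeed - desiredHeight) // (upSpeed - downSpeed)
-- ===== Notes on version B (the rewrite author's own statement) =====
-- stated objective: simpler
-- what changed: replaces the day-by-day simulation loop with the closed-form ceiling-division formula 1 + ceil((desiredHeight-upSpeed)/(upSpeed-downSpeed))
-- outside the precondition, e.g. on solution(1, 2, 10): A does not finish within the time limit, B returns -8
import Mathlib
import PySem

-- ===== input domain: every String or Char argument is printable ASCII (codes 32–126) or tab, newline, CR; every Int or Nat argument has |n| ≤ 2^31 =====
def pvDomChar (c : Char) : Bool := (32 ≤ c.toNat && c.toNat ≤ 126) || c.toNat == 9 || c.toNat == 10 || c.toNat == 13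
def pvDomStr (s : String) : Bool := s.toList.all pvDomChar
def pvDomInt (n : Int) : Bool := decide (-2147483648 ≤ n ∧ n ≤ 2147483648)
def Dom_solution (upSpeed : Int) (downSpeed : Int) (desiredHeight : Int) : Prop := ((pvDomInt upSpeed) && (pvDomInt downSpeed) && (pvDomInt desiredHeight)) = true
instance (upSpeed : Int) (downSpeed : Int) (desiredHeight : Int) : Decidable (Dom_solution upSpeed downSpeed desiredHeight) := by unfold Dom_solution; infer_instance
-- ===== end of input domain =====

-- B replaces A's day-by-day simulation loop with a closed-form ceiling-division formula (simpler).
-- ===== PORT A =====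
-- 'while True' loop of A, with a fuel bound that (under Pre_) is never exhausted (totality guard only).
def solutionLoop (upSpeed : Int) (downSpeed : Int) (desiredHeight : Int) : Nat → Int → Int → Int
  | 0, _, days => days
  | fuel + 1, height, days =>
    let h := height + upSpeed
    let d := days + 1
    if h ≥ desiredHeight then d
    else solutionLoop upSpeed downSpeed desiredHeight fuel (h - downSpeed) d

def solution (upSpeed : Int) (downSpeed : Int) (desiredHeight : Int) : Int :=
  if (0 : Int) + upSpeed ≥ desiredHeight then 1
  else solutionLoop upSpeed downSpeed desiredHeight ((desiredHeight - upSpeed).toNat + 1) 0 0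

-- ===== PORT B =====
def solution_alt (upSpeed : Int) (downSpeed : Int) (desiredHeight : Int) : Int :=
  if upSpeed ≥ desiredHeight then 1
  else 1 - PySem.Int.floordiv (upSpeed - desiredHeight) (upSpeed - downSpeed)

-- ===== PRECONDITION & SPEC =====
-- Pre_ excludes exactly the inputs on which A's while-loop never terminates (upSpeed < desiredHeight and no positive net daily gain).
def Pre_solution (upSpeed : Int) (downSpeed : Int) (desiredHeight : Int) : Prop :=
  desiredHeight ≤ upSpeed ∨ downSpeed < upSpeed
instance (upSpeed : Int) (downSpeed : Int) (desiredHeight : Int) : Decidable (Pre_solution upSpeed downSpeed desiredHeight) := by unfold Pre_solution; infer_instance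
def pvWitness_solution : Int × Int × Int := (3, 1, 10)

def Spec_solution (upSpeed : Int) (downSpeed : Int) (desiredHeight : Int) (out : Int) : Prop := out = solution_alt upSpeed downSpeed desiredHeight
instance (upSpeed : Int) (downSpeed : Int) (desiredHeight : Int) (out : Int) : Decidable (Spec_solution upSpeed downSpeed desiredHeight out) := by unfold Spec_solution; infer_instance

-- ===== CLAIM (what is proved, stated in full; the proofs are below) =====
def Claim_equal_solution : Prop := ∀ (upSpeed : Int) (downSpeed : Int) (desiredHeight : Int), Dom_solution upSpeed downSpeed desiredHeight → Pre_solution upSpeed downSpeed desiredHeight → Spec_solution upSpeed downSpeed desiredHeight (solution upSpeed downSpeed desiredHeight)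

-- ===== LEMMAS AND PROOFS =====
-- Invariant of A's loop: with positive net gain, the loop computes days + 1 + max 0 (ceil (remaining/net)).
theorem solutionLoop_eq (upSpeed downSpeed desiredHeight : Int)
    (hnet : downSpeed < upSpeed) :
    ∀ (fuel : Nat) (height days : Int),
      (desiredHeight - height - upSpeed).toNat < fuel →
      solutionLoop upSpeed downSpeed desiredHeight fuel height days =
        days + 1 + max 0 (-(PySem.Int.floordiv (-(desiredHeight - height - upSpeed)) (upSpeed - downSpeed))) := by
  intro fuel
  induction fuel with
  | zero => intro height days h; omega
  | succ fuel ih =>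
    intro height days h
    have hpos : (0 : Int) < upSpeed - downSpeed := by omega
    rw [solutionLoop]
    by_cases hge : height + upSpeed ≥ desiredHeight
    · rw [if_pos hge]
      have h0 : 0 ≤ PySem.Int.floordiv (-(desiredHeight - height - upSpeed)) (upSpeed - downSpeed) := by
        rw [PySem.Int.floordiv_eq_ediv_of_pos hpos]
        exact Int.ediv_nonneg (by omega) (by omega)
      omega
    · rw [if_neg hge]
      have hk : 0 < desiredHeight - height - upSpeed := by omega
      rw [ih (height + upSpeed - downSpeed) (days + 1) (by omega)]
      have hstep : PySem.Int.floordiv (-(desiredHeight - (height + upSpeed - downSpeed) - upSpeed)) (upSpeed - downSpeed)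
          = PySem.Int.floordiv (-(desiredHeight - height - upSpeed)) (upSpeed - downSpeed) + 1 := by
        rw [PySem.Int.floordiv_eq_ediv_of_pos hpos, PySem.Int.floordiv_eq_ediv_of_pos hpos]
        have : -(desiredHeight - (height + upSpeed - downSpeed) - upSpeed)
            = -(desiredHeight - height - upSpeed) + 1 * (upSpeed - downSpeed) := by ring
        rw [this, Int.add_mul_ediv_right _ _ (by omega)]
      have hneg : PySem.Int.floordiv (-(desiredHeight - height - upSpeed)) (upSpeed - downSpeed) < 0 := by
        rw [PySem.Int.floordiv_lt_iff_lt_mul hpos]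
        omega
      omega

-- ===== VERDICT (by name: the statement is the Claim_ definition above) =====
theorem solution_spec : Claim_equal_solution := by
  intro upSpeed downSpeed desiredHeight _hdom hpre
  unfold Spec_solution solution solution_alt
  by_cases hge : upSpeed ≥ desiredHeight
  · rw [if_pos (by omega), if_pos hge]
  · have hnet : downSpeed < upSpeed := by
      rcases hpre with h | h
      · omega
      · exact h
    have hpos : (0 : Int) < upSpeed - downSpeed := by omega
    rw [if_neg (by omega), if_neg hge]
    rw [solutionLoop_eq upSpeed downSpeed desiredHeight hnet _ 0 0 (by omega)]
    have hneg : PySem.Int.floordiv (-(desiredHeight - 0 - upSpeed)) (upSpeed - downSpeed) < 0 := by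
      rw [PySem.Int.floordiv_lt_iff_lt_mul hpos]
      omega
    have heq : -(desiredHeight - 0 - upSpeed) = upSpeed - desiredHeight := by ring
    rw [heq] at hneg ⊢
    omega
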